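-- pv_equiv track=rewrite | github.com/marcosfede/algorithms | googlecodejam/2019/Alien Rhyme/alien_rhyme.py | solve
-- ===== SOURCE A (Python) =====
-- from collections import defaultdict
--
-- def solve2(words):
--     if len(words) < 2:
--         return 0
--     if len(words) <= 3:
--         return 1
--     d = defaultdict(list)
--     for word in words:
--         if len(word) > 0:
--             d[word[-1]].append(word[:-1])
--     count = 0
--
--     for key,val in d.items():
--         count += solve2(val)
--
--     huerfanos = len(words) - (2* count)
--     if huerfanos > 1:
--         count += 1
--     return count
--
-- def solve(words):
--     d = defaultdict(list)
--     for word in words: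
--         d[word[-1]].append(word[:-1])
--     count = 0
--     for key,val in d.items():
--         count += solve2(val)
--     return count
-- ===== SOURCE B (Python) =====
-- def solve(words):
--     # Sort the reversed words once, then walk the (implicit) reversed-word trie
--     # by depth index over contiguous sorted runs -- no per-level string slicing.
--     rws = sorted([list(reversed(w)) for w in words])
--     return _go(rws, 0)
--
--
-- def _go(group, depth):
--     # group: sorted reversed words, all sharing their first `depth` characters.
--     i = 0
--     while i < len(group) and len(group[i]) == depth:
--         i += 1
--     pairs = 0
--     while i < len(group):
--         c = group[i][depth]
--         j = i
--         while j < len(group) and group[j][depth] == c: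
--             j += 1
--         pairs += _go(group[i:j], depth + 1)
--         i = j
--     if depth > 0 and len(group) - 2 * pairs >= 2:
--         pairs += 1
--     return pairs
-- ===== Notes on version B (the rewrite author's own statement) =====
-- stated objective: alternative
-- what changed: A recursively rebuilds defaultdicts of sliced word copies (word[:-1]) at every trie level; B reverses each word once, sorts the list, and walks the implicit reversed-word trie by depth index over contiguous sorted runs, never slicing a string.
import Mathlib
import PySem

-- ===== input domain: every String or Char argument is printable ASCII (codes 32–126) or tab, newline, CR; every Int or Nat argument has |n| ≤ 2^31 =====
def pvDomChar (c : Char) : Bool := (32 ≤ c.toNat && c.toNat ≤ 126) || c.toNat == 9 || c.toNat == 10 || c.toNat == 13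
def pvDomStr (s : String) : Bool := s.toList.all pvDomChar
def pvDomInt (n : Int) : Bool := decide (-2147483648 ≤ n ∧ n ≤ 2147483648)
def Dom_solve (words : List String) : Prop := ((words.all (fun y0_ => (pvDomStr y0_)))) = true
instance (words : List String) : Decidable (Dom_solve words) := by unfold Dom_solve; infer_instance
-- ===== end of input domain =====

-- B replaces A's per-level string slicing and dict grouping by one sort of the reversed
-- words followed by a depth-indexed walk over contiguous runs (objective: alternative).

-- ===== PORT A =====
-- fuel bound for the port of A's recursion (a totality guard only): sum of (len w + 1)
def pvMuS (ws : List String) : Nat := (ws.map (fun w => w.toList.length + 1)).sum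

def solve2F : Nat → List String → Int
  | 0, _ => 0
  | fuel+1, ws =>
    if (ws.length : Int) < 2 then 0
    else if (ws.length : Int) ≤ 3 then 1
    else
      let d := ws.foldl (fun d w =>
        if 0 < PySem.Str.len w then
          match PySem.Str.pyGet? w (-1) with   -- word[-1]; some _ exactly when len(word) > 0
          | some c => d.modify c [] (fun v => v ++ [PySem.Str.slice w none (some (-1))])
          | none => d
        else d) (PySem.Dict.empty)
      let count := d.items.foldl (fun acc kv => acc + solve2F fuel kv.2) 0
      if 1 < (ws.length : Int) - 2 * count then count + 1 else count

def solve (words : List String) : Int :=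
  let d := words.foldl (fun d w =>
      match PySem.Str.pyGet? w (-1) with   -- word[-1]: none = IndexError (excluded by Pre_)
      | some c => d.modify c [] (fun v => v ++ [PySem.Str.slice w none (some (-1))])
      | none => d) (PySem.Dict.empty)
  d.items.foldl (fun acc kv => acc + solve2F (pvMuS kv.2) kv.2) 0

-- ===== PORT B =====
-- fuel bound for the port of B's recursion (a totality guard only)
def pvMu (rs : List (List Char)) : Nat := (rs.map (fun r => r.length + 1)).sum

-- second while loop of _go: one iteration per contiguous run of equal chars at `depth`;
-- `gf` is _go one fuel level down, `g` a totality guard (the loop shortens `rest` each turn)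
def goLoopAux (gf : List (List Char) → Nat → Int) : Nat → List (List Char) → Nat → Int
  | 0, _, _ => 0
  | _+1, [], _ => 0
  | g+1, r0 :: rest', depth =>
    match r0[depth]? with
    | none => 0   -- python would raise here; unreachable for lists built by solve_alt
    | some c =>
      let run := (r0 :: rest').takeWhile (fun r => r[depth]? == some c)
      gf run (depth + 1) + goLoopAux gf g ((r0 :: rest').drop run.length) depth

-- _go(group, depth) of Source B
def goF : Nat → List (List Char) → Nat → Int
  | 0, _, _ => 0
  | f+1, group, depth =>
    -- first while loop: skip the words that end exactly at this depth
    let rest := group.dropWhile (fun r => r.length == depth)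
    let pairs := goLoopAux (goF f) rest.length rest depth
    if 0 < depth ∧ 2 ≤ (group.length : Int) - 2 * pairs then pairs + 1 else pairs

def solve_alt (words : List String) : Int :=
  let rws := PySem.List.sorted (words.map (fun w => w.toList.reverse)) (fun x => x) false
  goF (pvMu rws) rws 0

-- ===== PRECONDITION & SPEC =====
-- Pre_ excludes lists containing an empty word, on which A raises IndexError (word[-1]).
def Pre_solve (words : List String) : Prop := ∀ w ∈ words, w ≠ ""
instance (words : List String) : Decidable (Pre_solve words) := by unfold Pre_solve; infer_instance
def pvWitness_solve : List String := ["ab", "b", "cb", "dd"]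

def Spec_solve (words : List String) (out : Int) : Prop := out = solve_alt words
instance (words : List String) (out : Int) : Decidable (Spec_solve words out) := by unfold Spec_solve; infer_instance

-- ===== CLAIM (what is proved, stated in full; the proofs are below) =====
def Claim_equal_solve : Prop := ∀ (words : List String), Dom_solve words → Pre_solve words → Spec_solve words (solve words)

-- ===== LEMMAS AND PROOFS =====

-- The common canonical recursion both ports are reduced to: group the (reversed) words
-- by head character, recurse on the tails, then pair two leftovers if possible.
def Gne (rs : List (List Char)) : List (List Char) := rs.filter (fun r => decide (r ≠ []))
def Ggroup (rs : List (List Char)) (c : Char) : List (List Char) :=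
  ((Gne rs).filter (fun r => r.headI == c)).map List.tail
def G : Nat → List (List Char) → Int
  | 0, _ => 0
  | f+1, rs =>
    let p := (PySem.List.dedup ((Gne rs).map (fun r => r.headI))).foldl
               (fun a c => a + G f (Ggroup rs c)) 0
    if 1 < (rs.length : Int) - 2 * p then p + 1 else p

-- ---------- generic list/fold facts ----------
theorem pv_foldl_if_filter {α β : Type} (p : α → Prop) [DecidablePred p] (f : β → α → β)
    (l : List α) (init : β) :
    l.foldl (fun d x => if p x then f d x else d) init
      = (l.filter (fun x => decide (p x))).foldl f init := by
  induction l generalizing init with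
  | nil => rfl
  | cons a t ih => by_cases h : p a <;> simp [h, ih]

theorem pv_sum_dedup (l : List Char) (h : Char → Int) :
    ((PySem.List.dedup l).map h).sum = ∑ c ∈ l.toFinset, h c := by
  rw [← List.sum_toFinset h (PySem.List.nodup_dedup l)]
  congr 1
  ext c
  simp

-- ---------- the canonical recursion G ----------
theorem Gne_self {rs : List (List Char)} (h : ∀ r ∈ rs, r ≠ []) : Gne rs = rs := by
  simp [Gne, List.filter_eq_self]; exact fun r hr => by simpa using h r hr

theorem Gne_idem (rs : List (List Char)) : Gne (Gne rs) = Gne rs := by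
  simp [Gne, List.filter_filter]

theorem Ggroup_congr {rs rs' : List (List Char)} (h : Gne rs = Gne rs') (c : Char) :
    Ggroup rs c = Ggroup rs' c := by simp [Ggroup, h]

theorem G_succ (f : Nat) (rs : List (List Char)) :
    G (f+1) rs =
      (if 1 < (rs.length : Int) - 2 * (∑ c ∈ ((Gne rs).map (fun r => r.headI)).toFinset, G f (Ggroup rs c))
       then (∑ c ∈ ((Gne rs).map (fun r => r.headI)).toFinset, G f (Ggroup rs c)) + 1
       else (∑ c ∈ ((Gne rs).map (fun r => r.headI)).toFinset, G f (Ggroup rs c))) := by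
  have : (PySem.List.dedup ((Gne rs).map (fun r => r.headI))).foldl
            (fun a c => a + G f (Ggroup rs c)) 0
        = ∑ c ∈ ((Gne rs).map (fun r => r.headI)).toFinset, G f (Ggroup rs c) := by
    rw [PySem.List.foldl_add, zero_add, pv_sum_dedup]
  simp only [G]
  rw [this]

theorem G_nil (f : Nat) : G f [] = 0 := by
  cases f <;> simp [G, Gne, Ggroup]

-- ---------- the size measure ----------
theorem pvMu_eq (rs : List (List Char)) : pvMu rs = (rs.map List.length).sum + rs.length := by
  induction rs with
  | nil => rfl
  | cons r t ih => simp [pvMu] at ih ⊢; omega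

theorem pvMu_perm {rs rs' : List (List Char)} (h : rs.Perm rs') : pvMu rs = pvMu rs' := by
  exact (h.map _).sum_eq

theorem pvMu_sublist {rs rs' : List (List Char)} (h : rs.Sublist rs') : pvMu rs ≤ pvMu rs' := by
  exact (h.map _).sum_le_sum (by intro a ha; positivity)

theorem length_le_pvMu (rs : List (List Char)) : rs.length ≤ pvMu rs := by
  rw [pvMu_eq]; omega

theorem pvMu_group_le (rs : List (List Char)) (c : Char) :
    pvMu (Ggroup rs c) + rs.length ≤ pvMu rs := by
  have hsub : ((Gne rs).filter (fun r => r.headI == c)).Sublist rs :=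
    List.filter_sublist.trans List.filter_sublist
  have h1 : pvMu (Ggroup rs c) = (((Gne rs).filter (fun r => r.headI == c)).map List.length).sum := by
    unfold Ggroup pvMu
    rw [List.map_map]
    apply congrArg
    apply List.map_congr_left
    intro r hr
    have hr2 : r ∈ Gne rs := (List.mem_filter.1 hr).1
    have hne : r ≠ [] := by simpa using (List.mem_filter.1 hr2).2
    cases r with
    | nil => exact absurd rfl hne
    | cons x xs => simp
  rw [h1, pvMu_eq]
  have := (hsub.map List.length).sum_le_sum (by intro a _; positivity)
  omega
-- ---------- permutation and fuel invariance of G ----------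
theorem Gne_perm {rs rs' : List (List Char)} (h : rs.Perm rs') : (Gne rs).Perm (Gne rs') := h.filter _

theorem G_perm : ∀ (f : Nat) {rs rs' : List (List Char)}, rs.Perm rs' → G f rs = G f rs' := by
  intro f
  induction f with
  | zero => intro rs rs' _; rfl
  | succ f ih =>
    intro rs rs' h
    have hne := Gne_perm h
    have hsets : ((Gne rs).map (fun r => r.headI)).toFinset
        = ((Gne rs').map (fun r => r.headI)).toFinset := by
      apply Finset.ext; intro c
      simp only [List.mem_toFinset]
      exact (hne.map _).mem_iff
    rw [G_succ, G_succ, h.length_eq, ← hsets]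
    have hsum : ∑ c ∈ ((Gne rs).map (fun r => r.headI)).toFinset, G f (Ggroup rs c)
        = ∑ c ∈ ((Gne rs).map (fun r => r.headI)).toFinset, G f (Ggroup rs' c) := by
      apply Finset.sum_congr rfl
      intro c _
      exact ih ((hne.filter _).map _)
    rw [hsum]


-- ---------- counting: the groups partition the nonempty words ----------
theorem length_Ggroup (rs : List (List Char)) (c : Char) :
    (Ggroup rs c).length = ((Gne rs).map (fun r => r.headI)).count c := by
  unfold Ggroup
  rw [List.length_map, ← List.countP_eq_length_filter, List.count_eq_countP, List.countP_map]
  rfl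

-- lex toolkit, all via < (List.instLT)
theorem sum_length_groups (rs : List (List Char)) :
    ∑ c ∈ ((Gne rs).map (fun r => r.headI)).toFinset, ((Ggroup rs c).length : Int)
      = ((Gne rs).length : Int) := by
  have h : ∀ c ∈ ((Gne rs).map (fun r => r.headI)).toFinset,
      ((Ggroup rs c).length : Int) = (((Gne rs).map (fun r => r.headI)).count c : Int) := by
    intro c _; simp [length_Ggroup]
  rw [Finset.sum_congr rfl h]
  rw [← Nat.cast_sum]
  rw [List.sum_toFinset_count_eq_length]
  simp

-- ---------- bounds on G (they absorb A's small-list shortcuts) ----------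
theorem G_bounds : ∀ (n : Nat) (rs : List (List Char)) (f : Nat),
    pvMu rs ≤ n → pvMu rs ≤ f → 0 ≤ G f rs ∧ 2 * G f rs ≤ (rs.length : Int) := by
  intro n
  induction n using Nat.strong_induction_on with
  | _ n IH =>
    intro rs f hn hf
    cases rs with
    | nil => rw [G_nil]; simp
    | cons r t =>
      have hlen : 1 ≤ pvMu (r :: t) := by rw [pvMu_eq]; simp; omega
      match f, hf with
      | 0, hf => omega
      | f0+1, hf =>
      rw [G_succ]
      have hterm : ∀ c ∈ ((Gne (r::t)).map (fun r => r.headI)).toFinset,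
          0 ≤ G f0 (Ggroup (r::t) c) ∧ 2 * G f0 (Ggroup (r::t) c) ≤ ((Ggroup (r::t) c).length : Int) := by
        intro c _
        have hg := pvMu_group_le (r :: t) c
        have hL : 1 ≤ (r :: t).length := by simp
        exact IH (n-1) (by omega) _ f0 (by omega) (by omega)
      have hp0 : 0 ≤ ∑ c ∈ ((Gne (r::t)).map (fun r => r.headI)).toFinset, G f0 (Ggroup (r::t) c) :=
        Finset.sum_nonneg (fun c hc => (hterm c hc).1)
      have h2p : 2 * (∑ c ∈ ((Gne (r::t)).map (fun r => r.headI)).toFinset, G f0 (Ggroup (r::t) c))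
          ≤ ((Gne (r::t)).length : Int) := by
        rw [Finset.mul_sum]
        calc ∑ c ∈ ((Gne (r::t)).map (fun r => r.headI)).toFinset, 2 * G f0 (Ggroup (r::t) c)
            ≤ ∑ c ∈ ((Gne (r::t)).map (fun r => r.headI)).toFinset, ((Ggroup (r::t) c).length : Int) :=
              Finset.sum_le_sum (fun c hc => (hterm c hc).2)
          _ = ((Gne (r::t)).length : Int) := sum_length_groups (r::t)
      have hGle : ((Gne (r::t)).length : Int) ≤ ((r::t).length : Int) := by
        exact_mod_cast List.length_filter_le _ _
      split_ifs with hbr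
      · constructor <;> omega
      · constructor <;> omega

theorem G_pos (n : Nat) (rs : List (List Char)) (f : Nat)
    (hn : pvMu rs ≤ n) (hf : pvMu rs ≤ f) (h2 : 2 ≤ rs.length) : 1 ≤ G f rs := by
  cases rs with
  | nil => simp at h2
  | cons r t =>
    have hlen : 1 ≤ pvMu (r :: t) := by rw [pvMu_eq]; simp; omega
    match f, hf with
    | 0, hf => omega
    | f0+1, hf =>
    rw [G_succ]
    have hp0 : 0 ≤ ∑ c ∈ ((Gne (r::t)).map (fun r => r.headI)).toFinset, G f0 (Ggroup (r::t) c) := by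
      apply Finset.sum_nonneg
      intro c _
      have hg := pvMu_group_le (r :: t) c
      have hL : 1 ≤ (r :: t).length := by simp
      exact (G_bounds (pvMu (Ggroup (r::t) c)) _ f0 (le_refl _) (by omega)).1
    have h2' : (2 : Int) ≤ ((r::t).length : Int) := by exact_mod_cast h2
    split_ifs with hbr
    · omega
    · omega

-- ---------- string-side abbreviations for port A ----------
def pvRev (w : String) : List Char := w.toList.reverse

theorem pv_list_get_neg_one (l : List Char) (h : l ≠ []) :
    PySem.List.pyGet? l (-1) = some l.reverse.headI := by
  have h1 : 1 ≤ l.length := by cases l with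
    | nil => exact absurd rfl h
    | cons a t => simp
  simp only [PySem.List.pyGet?, PySem.List.pyIdx?]
  norm_num [h1]
  rw [show l[l.length - 1]? = l.getLast? from List.getLast?_eq_getElem?.symm, ← List.head?_reverse]
  cases hr : l.reverse with
  | nil => simp at hr; exact absurd hr h
  | cons a t => simp

theorem pv_pyGet_neg_one (w : String) (h : w.toList ≠ []) :
    PySem.Str.pyGet? w (-1) = some (pvRev w).headI := by
  simp only [PySem.Str.pyGet?_eq, PySem.Chars.pyGet?_eq_listPyGet?]
  exact pv_list_get_neg_one _ h

theorem pv_strip_rev (w : String) :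
    pvRev (PySem.Str.slice w none (some (-1))) = (pvRev w).tail := by
  unfold pvRev
  rw [PySem.Str.slice_to_neg_one]
  exact List.tail_reverse.symm

theorem pvMuS_eq (ws : List String) : pvMuS ws = pvMu (ws.map pvRev) := by
  simp [pvMuS, pvMu, pvRev, Function.comp_def]

-- ---------- the dict built by A = filter-grouping ----------
theorem pv_update_nil_dedup (l : List Char) : PySem.Set.update ([] : PySem.Set Char) l = PySem.List.dedup l := by
  simp [PySem.Set.update, PySem.Set.ofList_eq_foldl]

theorem pv_dict_eq (ws : List String) (h : ∀ w ∈ ws, w.toList ≠ []) (F : List String → Int) :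
    ((ws.foldl (fun d w =>
        match PySem.Str.pyGet? w (-1) with
        | some c => d.modify c [] (fun v => v ++ [PySem.Str.slice w none (some (-1))])
        | none => d) (PySem.Dict.empty)).items.foldl (fun acc kv => acc + F kv.2) 0)
      = ((PySem.List.dedup (ws.map (fun w => (pvRev w).headI))).map
          (fun c => F ((ws.filter (fun w => (pvRev w).headI == c)).map
            (fun w => PySem.Str.slice w none (some (-1)))))).sum := by
  -- the match always takes the `some` branch
  have hcongr : ws.foldl (fun d w =>
        match PySem.Str.pyGet? w (-1) with
        | some c => d.modify c [] (fun v => v ++ [PySem.Str.slice w none (some (-1))])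
        | none => d) (PySem.Dict.empty)
      = ws.foldl (fun d w => d.modify ((pvRev w).headI) []
          (fun v => v ++ [PySem.Str.slice w none (some (-1))])) (PySem.Dict.empty) := by
    apply PySem.List.foldl_congr_mem
    intro acc w hw
    rw [pv_pyGet_neg_one w (h w hw)]
  rw [hcongr]
  set d := ws.foldl (fun d w => d.modify ((pvRev w).headI) []
          (fun v => v ++ [PySem.Str.slice w none (some (-1))])) (PySem.Dict.empty) with hd
  have hkeys : d.keys = PySem.List.dedup (ws.map (fun w => (pvRev w).headI)) := by
    rw [hd, PySem.Dict.keys_foldl_modify_key ws (fun w => (pvRev w).headI) []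
          (fun d w => fun v => v ++ [PySem.Str.slice w none (some (-1))]) PySem.Dict.empty]
    have he : (PySem.Dict.empty : PySem.Dict Char (List String)).keys = [] := rfl
    rw [he, pv_update_nil_dedup]
  have hnodup : d.keys.Nodup := by
    rw [hkeys]; exact PySem.List.nodup_dedup _
  have hgetD : ∀ c, d.getD c [] = (ws.filter (fun w => (pvRev w).headI == c)).map
            (fun w => PySem.Str.slice w none (some (-1))) := by
    intro c
    rw [hd]
    have hmap : ws.foldl (fun d w => d.modify ((pvRev w).headI) []
          (fun v => v ++ [PySem.Str.slice w none (some (-1))])) (PySem.Dict.empty)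
        = ((ws.map (fun w => ((pvRev w).headI, PySem.Str.slice w none (some (-1))))).foldl
            (fun d p => d.modify p.1 [] (fun v => v ++ [p.2])) (PySem.Dict.empty)) := by
      rw [List.foldl_map]
    rw [hmap, PySem.Dict.getD_foldl_modify_append]
    rw [List.filter_map]
    simp [List.map_map, Function.comp_def]
  rw [PySem.List.foldl_add, zero_add]
  rw [PySem.Dict.items_eq_map_keys d hnodup []]
  rw [List.map_map, hkeys]
  congr 1
  apply List.map_congr_left
  intro c _
  simp [Function.comp_def, hgetD c]

-- ---------- port A = G ----------
theorem pv_filter_rev (ws : List String) :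
    Gne (ws.map pvRev) = (ws.filter (fun w => decide (0 < PySem.Str.len w))).map pvRev := by
  unfold Gne
  rw [List.filter_map]
  congr 1
  apply List.filter_congr
  intro w _
  simp only [Function.comp_def, pvRev, PySem.Str.len_eq]
  by_cases hw : w.toList = []
  · simp [hw]
  · simp [hw, Nat.cast_pos]
    exact Nat.zero_lt_of_lt (List.length_pos_of_ne_nil hw)

theorem pv_group_A (ws : List String) (h : ∀ w ∈ ws, w.toList ≠ []) (c : Char) :
    Ggroup (ws.map pvRev) c
      = ((ws.filter (fun w => (pvRev w).headI == c)).map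
          (fun w => PySem.Str.slice w none (some (-1)))).map pvRev := by
  unfold Ggroup
  have hne : Gne (ws.map pvRev) = ws.map pvRev := by
    apply Gne_self
    intro r hr
    obtain ⟨w, hw, rfl⟩ := List.mem_map.1 hr
    simpa [pvRev] using h w hw
  rw [hne, List.filter_map]
  simp only [List.map_map]
  apply List.map_congr_left
  intro w _
  simp only [Function.comp_def]
  exact (pv_strip_rev w).symm

theorem A_eq : ∀ (n : Nat) (ws : List String) (f f' : Nat),
    pvMu (ws.map pvRev) ≤ n → pvMu (ws.map pvRev) ≤ f → pvMu (ws.map pvRev) ≤ f' →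
    solve2F f ws = G f' (ws.map pvRev) := by
  intro n
  induction n using Nat.strong_induction_on with
  | _ n IH =>
    intro ws f f' hn hf hf'
    have hlenrs : (ws.map pvRev).length = ws.length := by simp
    have hmuL : ws.length ≤ pvMu (ws.map pvRev) := by
      have := length_le_pvMu (ws.map pvRev); omega
    by_cases hlen2 : ws.length < 2
    · obtain ⟨hb1, hb2⟩ := G_bounds (pvMu (ws.map pvRev)) (ws.map pvRev) f' (le_refl _) hf'
      have hcast : ((ws.map pvRev).length : Int) ≤ 1 := by exact_mod_cast (by omega : (ws.map pvRev).length ≤ 1)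
      have hz : G f' (ws.map pvRev) = 0 := by omega
      cases f with
      | zero => simp [solve2F, hz]
      | succ f0 =>
        rw [hz]
        simp only [solve2F]
        rw [if_pos (by exact_mod_cast hlen2)]
    · by_cases hlen3 : ws.length ≤ 3
      · obtain ⟨hb1, hb2⟩ := G_bounds (pvMu (ws.map pvRev)) (ws.map pvRev) f' (le_refl _) hf'
        have hp := G_pos (pvMu (ws.map pvRev)) (ws.map pvRev) f' (le_refl _) hf' (by omega)
        have hcast : ((ws.map pvRev).length : Int) ≤ 3 := by exact_mod_cast (by omega : (ws.map pvRev).length ≤ 3)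
        have ho : G f' (ws.map pvRev) = 1 := by omega
        match f, hf with
        | 0, hf => omega
        | f0+1, hf =>
          rw [ho]
          simp only [solve2F]
          rw [if_neg (by exact_mod_cast hlen2), if_pos (by exact_mod_cast hlen3)]
      · match f, hf with
        | 0, hf => omega
        | f0+1, hf =>
        match f', hf' with
        | 0, hf' => omega
        | f1+1, hf' =>
        simp only [solve2F]
        rw [if_neg (by exact_mod_cast hlen2), if_neg (by exact_mod_cast hlen3)]
        -- the guarded dict-building loop is the loop over the nonempty words
        rw [pv_foldl_if_filter (fun w => 0 < PySem.Str.len w)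
              (fun d w =>
                match PySem.Str.pyGet? w (-1) with
                | some c => d.modify c [] (fun v => v ++ [PySem.Str.slice w none (some (-1))])
                | none => d) ws PySem.Dict.empty]
        set ws' := ws.filter (fun w => decide (0 < PySem.Str.len w)) with hws'
        have hws'ne : ∀ w ∈ ws', w.toList ≠ [] := by
          intro w hw
          have h2 := (List.mem_filter.1 hw).2
          simp only [PySem.Str.len_eq, decide_eq_true_eq] at h2
          exact List.ne_nil_of_length_pos (by exact_mod_cast h2)
        rw [pv_dict_eq ws' hws'ne (fun val => solve2F f0 val)]
        rw [pv_sum_dedup]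
        have hrs' : ws'.map pvRev = Gne (ws.map pvRev) := (pv_filter_rev ws).symm
        have hkeysets : (ws'.map (fun w => (pvRev w).headI)).toFinset
            = ((Gne (ws.map pvRev)).map (fun r => r.headI)).toFinset := by
          rw [← hrs', List.map_map]
          rfl
        have hterm : ∀ c, solve2F f0 ((ws'.filter (fun w => (pvRev w).headI == c)).map
              (fun w => PySem.Str.slice w none (some (-1))))
            = G f1 (Ggroup (ws.map pvRev) c) := by
          intro c
          have hgA := pv_group_A ws' hws'ne c
          have hGG : Ggroup (ws'.map pvRev) c = Ggroup (ws.map pvRev) c := by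
            apply Ggroup_congr
            rw [hrs', Gne_idem]
          have e1 : (((ws'.filter (fun w => (pvRev w).headI == c)).map
              (fun w => PySem.Str.slice w none (some (-1)))).map pvRev)
              = Ggroup (ws.map pvRev) c := hgA.symm.trans hGG
          have hmu3 := pvMu_group_le (ws.map pvRev) c
          have hmu4 : pvMu ((((ws'.filter (fun w => (pvRev w).headI == c)).map
              (fun w => PySem.Str.slice w none (some (-1)))).map pvRev))
              + (ws.map pvRev).length ≤ pvMu (ws.map pvRev) := by rw [e1]; exact hmu3
          have hL1 : 1 ≤ (ws.map pvRev).length := by omega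
          exact (IH (n-1) (by omega) _ f0 f1 (by omega) (by omega) (by omega)).trans (by rw [e1])
        have hsum : ∑ c ∈ (ws'.map (fun w => (pvRev w).headI)).toFinset,
              solve2F f0 ((ws'.filter (fun w => (pvRev w).headI == c)).map
                (fun w => PySem.Str.slice w none (some (-1))))
            = ∑ c ∈ ((Gne (ws.map pvRev)).map (fun r => r.headI)).toFinset,
                G f1 (Ggroup (ws.map pvRev) c) := by
          rw [hkeysets]
          exact Finset.sum_congr rfl (fun c _ => hterm c)
        rw [hsum, G_succ, hlenrs]

theorem solve_eq (words : List String) (h : ∀ w ∈ words, w.toList ≠ []) (F : Nat)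
    (hF : pvMu (words.map pvRev) ≤ F) :
    solve words = ∑ c ∈ ((words.map pvRev).map (fun r => r.headI)).toFinset,
      G F (Ggroup (words.map pvRev) c) := by
  unfold solve
  rw [pv_dict_eq words h (fun val => solve2F (pvMuS val) val)]
  rw [pv_sum_dedup]
  have hne : Gne (words.map pvRev) = words.map pvRev := by
    apply Gne_self
    intro r hr
    obtain ⟨w, hw, rfl⟩ := List.mem_map.1 hr
    simpa [pvRev] using h w hw
  have hkeysets : (words.map (fun w => (pvRev w).headI)).toFinset
      = ((words.map pvRev).map (fun r => r.headI)).toFinset := by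
    rw [List.map_map]; rfl
  rw [hkeysets]
  apply Finset.sum_congr rfl
  intro c _
  have e1 : (((words.filter (fun w => (pvRev w).headI == c)).map
      (fun w => PySem.Str.slice w none (some (-1)))).map pvRev)
      = Ggroup (words.map pvRev) c := (pv_group_A words h c).symm
  have hmu3 := pvMu_group_le (words.map pvRev) c
  have hmu4 : pvMu ((((words.filter (fun w => (pvRev w).headI == c)).map
      (fun w => PySem.Str.slice w none (some (-1)))).map pvRev))
      + (words.map pvRev).length ≤ pvMu (words.map pvRev) := by rw [e1]; exact hmu3
  refine (A_eq (pvMu (words.map pvRev)) _ _ F ?_ ?_ ?_).trans (by rw [e1])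
  · omega
  · rw [pvMuS_eq]
  · omega

-- ---------- lexicographic order toolkit for port B ----------
theorem pv_le_append (p t : List Char) : p ≤ p ++ t := by
  rw [le_iff_lt_or_eq]
  cases t with
  | nil => right; simp
  | cons a s =>
    left
    induction p with
    | nil => exact List.nil_lt_cons a s
    | cons x l ih => exact List.cons_lt_cons_iff.2 (Or.inr ⟨rfl, ih⟩)
theorem pv_prefix_le {p r : List Char} (h : p <+: r) : p ≤ r := by
  obtain ⟨t, rfl⟩ := h; exact pv_le_append p t

theorem pv_append_lt_append_iff (p : List Char) {a b : List Char} : p ++ a < p ++ b ↔ a < b := by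
  induction p with
  | nil => simp
  | cons x l ih => simpa [List.cons_lt_cons_iff] using ih

theorem pv_append_le_append_iff (p : List Char) {a b : List Char} : p ++ a ≤ p ++ b ↔ a ≤ b := by
  rw [le_iff_lt_or_eq, le_iff_lt_or_eq, pv_append_lt_append_iff, List.append_cancel_left_eq]
theorem pv_char_mono {pre a b : List Char} {depth : Nat} (hl : pre.length = depth)
    (ha : pre <+: a) (hb : pre <+: b) (hda : depth < a.length) (hdb : depth < b.length)
    (hab : a ≤ b) : (a.drop depth).headI ≤ (b.drop depth).headI := by
  obtain ⟨a', rfl⟩ := ha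
  obtain ⟨b', rfl⟩ := hb
  rw [pv_append_le_append_iff] at hab
  have hda' : a' ≠ [] := by intro h; subst h; simp at hda; omega
  have hdb' : b' ≠ [] := by intro h; subst h; simp at hdb; omega
  have e1 : (pre ++ a').drop depth = a' := by rw [← hl]; exact List.drop_left ..
  have e2 : (pre ++ b').drop depth = b' := by rw [← hl]; exact List.drop_left ..
  rw [e1, e2]
  cases a' with
  | nil => exact absurd rfl hda'
  | cons x xs => cases b' with
    | nil => exact absurd rfl hdb'
    | cons y ys =>
      rw [le_iff_lt_or_eq] at hab
      rcases hab with h | h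
      · rcases List.cons_lt_cons_iff.1 h with h | ⟨rfl, _⟩
        · exact le_of_lt h
        · exact le_refl _
      · simp at h; rcases h with ⟨rfl, _⟩; exact le_refl _
theorem pv_getElem?_depth {r : List Char} {depth : Nat} (h : depth < r.length) :
    r[depth]? = some ((r.drop depth).headI) := by
  have h2 : (r.drop depth) ≠ [] := by simp; omega
  rw [← List.head?_drop]
  cases hd : r.drop depth with
  | nil => exact absurd hd h2
  | cons a l => simp
theorem pv_prefix_snoc {pre r : List Char} {depth : Nat} (hl : pre.length = depth)
    (hp : pre <+: r) (hd : depth < r.length) (c : Char)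
    (hc : (r.drop depth).headI = c) : (pre ++ [c]) <+: r := by
  obtain ⟨t, rfl⟩ := hp
  have ht : (pre ++ t).drop depth = t := by rw [← hl]; exact List.drop_left ..
  rw [ht] at hc
  cases t with
  | nil => simp at hd; omega
  | cons x xs =>
    simp at hc
    subst hc
    exact ⟨xs, by simp⟩
theorem pv_tw_filter {α : Type} (p : α → Bool) :
    ∀ (l : List α), l.Pairwise (fun a b => p b = true → p a = true) →
      l.takeWhile p = l.filter p ∧ l.dropWhile p = l.filter (fun x => !p x) := by
  intro l hl
  induction l with
  | nil => simp
  | cons a t ih =>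
    rcases List.pairwise_cons.1 hl with ⟨hall, ht⟩
    by_cases hp : p a
    · have := ih ht
      simp [hp, this.1, this.2]
    · have hnone : ∀ x ∈ t, p x = false := by
        intro x hx
        by_contra hc
        exact hp (hall x hx (by simpa using hc))
      constructor
      · rw [List.takeWhile_cons_of_neg (by simpa using hp)]
        rw [List.filter_cons_of_neg (by simpa using hp)]
        rw [List.filter_eq_nil_iff.2 (by intro x hx; simpa using hnone x hx)]
      · rw [List.dropWhile_cons_of_neg (by simpa using hp)]
        rw [List.filter_cons_of_pos (by simpa using hp)]
        congr 1
        symm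
        rw [List.filter_eq_self]
        intro x hx; simpa using hnone x hx
-- ---------- port B = G ----------
theorem pv_drop_takeWhile {α : Type} (p : α → Bool) :
    ∀ (l : List α), l.drop (l.takeWhile p).length = l.dropWhile p := by
  intro l
  induction l with
  | nil => rfl
  | cons a t ih =>
    by_cases h : p a
    · rw [List.takeWhile_cons_of_pos h, List.dropWhile_cons_of_pos h]
      simpa using ih
    · rw [List.takeWhile_cons_of_neg (by simpa using h), List.dropWhile_cons_of_neg (by simpa using h)]
      simp

theorem pv_mu_drop_succ {l : List (List Char)} {depth : Nat} (h : ∀ r ∈ l, depth < r.length) :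
    pvMu (l.map (List.drop (depth+1))) + l.length = pvMu (l.map (List.drop depth)) := by
  induction l with
  | nil => rfl
  | cons r t ih =>
    have hr := h r (by simp)
    have ht := ih (fun x hx => h x (by simp [hx]))
    simp only [List.map_cons, pvMu, List.sum_cons, List.length_drop, List.length_cons] at ht ⊢
    omega

-- one iteration of the run loop: chars at `depth` of a sorted prefix-sharing block
theorem loop_eq : ∀ (g : Nat) (f f' : Nat) (rest : List (List Char)) (depth : Nat) (pre : List Char),
    rest.length ≤ g →
    rest.Pairwise (· ≤ ·) → pre.length = depth → (∀ r ∈ rest, pre <+: r ∧ depth < r.length) →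
    (∀ (c : Char) (run : List (List Char)), run.Sublist rest → run.Pairwise (· ≤ ·) →
       (∀ r ∈ run, (pre ++ [c]) <+: r ∧ depth < r.length) → run ≠ [] →
       goF f run (depth+1) = G f' (run.map (List.drop (depth+1)))) →
    goLoopAux (goF f) g rest depth
      = ∑ c ∈ ((rest.map (List.drop depth)).map (fun r => r.headI)).toFinset,
          G f' (Ggroup (rest.map (List.drop depth)) c) := by
  intro g
  induction g with
  | zero =>
    intro f f' rest depth pre hg _ _ _ _
    have : rest = [] := List.length_eq_zero_iff.1 (by omega)
    subst this
    rw [show goLoopAux (goF f) 0 ([] : List (List Char)) depth = 0 from rfl]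
    simp
  | succ g ih =>
    intro f f' rest depth pre hg hsort hpre hall HG
    cases rest with
    | nil => simp [goLoopAux]
    | cons r0 rest' =>
      obtain ⟨hp0, hd0⟩ := hall r0 (by simp)
      have hget : r0[depth]? = some ((r0.drop depth).headI) := pv_getElem?_depth hd0
      set c := (r0.drop depth).headI with hc
      clear_value c
      -- predicate of the inner run
      set p : List Char → Bool := fun r => r[depth]? == some c with hp
      clear_value p
      have hpx : ∀ x ∈ r0 :: rest', (p x = true ↔ (x.drop depth).headI = c) := by
        intro x hx
        obtain ⟨hpx1, hdx⟩ := hall x hx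
        rw [hp]
        simp [pv_getElem?_depth hdx]
      have hchar : ∀ x ∈ r0 :: rest', c ≤ (x.drop depth).headI := by
        intro x hx
        rcases List.mem_cons.1 hx with rfl | hx'
        · exact hc.le
        · obtain ⟨hpx1, hdx⟩ := hall x hx
          rw [hc]
          exact pv_char_mono hpre hp0 hpx1 hd0 hdx ((List.pairwise_cons.1 hsort).1 x hx')
      have hpair : (r0 :: rest').Pairwise (fun a b => p b = true → p a = true) := by
        refine List.Pairwise.imp_of_mem ?_ hsort
        intro a b ha hb hab hpb
        obtain ⟨hpa1, hda⟩ := hall a ha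
        obtain ⟨hpb1, hdb⟩ := hall b hb
        refine (hpx a ha).2 ?_
        have hbc := (hpx b hb).1 hpb
        have h1 := hchar a ha
        have h2 := pv_char_mono hpre hpa1 hpb1 hda hdb hab
        rw [hbc] at h2
        exact le_antisymm h2 h1
      obtain ⟨htw, hdw⟩ := pv_tw_filter p _ hpair
      have hpr0 : p r0 = true := (hpx r0 (by simp)).2 hc.symm
      -- the list splits as run ++ next
      have hsplit : r0 :: rest' = ((r0 :: rest').takeWhile p) ++ ((r0 :: rest').dropWhile p) :=
        (List.takeWhile_append_dropWhile).symm
      -- evaluate the loop body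
      rw [show goLoopAux (goF f) (g+1) (r0 :: rest') depth
            = goF f ((r0 :: rest').takeWhile p) (depth+1)
              + goLoopAux (goF f) g ((r0 :: rest').drop ((r0 :: rest').takeWhile p).length) depth by
          simp only [goLoopAux, hget]
          rw [hp]]
      rw [pv_drop_takeWhile p]
      set run := (r0 :: rest').takeWhile p with hrun
      clear_value run
      set nxt := (r0 :: rest').dropWhile p with hnxt
      clear_value nxt
      have hrunne : run ≠ [] := by
        rw [hrun, List.takeWhile_cons_of_pos hpr0]
        simp
      have hrunmem : ∀ x ∈ run, (x.drop depth).headI = c ∧ pre <+: x ∧ depth < x.length := by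
        intro x hx
        rw [hrun] at hx
        have hx' : x ∈ r0 :: rest' := (List.takeWhile_sublist p).mem hx
        have hpxx : p x = true := List.mem_takeWhile_imp hx
        obtain ⟨h1, h2⟩ := hall x hx'
        exact ⟨(hpx x hx').1 hpxx, h1, h2⟩
      have hnxtmem : ∀ x ∈ nxt, (x.drop depth).headI ≠ c := by
        intro x hx
        rw [hdw] at hx
        have h2 := (List.mem_filter.1 hx).2
        have hx' : x ∈ r0 :: rest' := (List.mem_filter.1 hx).1
        intro he
        rw [← hpx x hx'] at he
        simp [he] at h2
      -- recursive call on the dropped part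
      have hnxtsub : nxt.Sublist (r0 :: rest') := by
        rw [hnxt]; exact List.dropWhile_sublist p
      have hnxtlen : nxt.length ≤ g := by
        have h1 : nxt = rest'.dropWhile p := by
          rw [hnxt, List.dropWhile_cons_of_pos hpr0]
        have h2 := (List.dropWhile_sublist (l := rest') (p := p)).length_le
        rw [h1]
        simp at hg
        omega
      have hrec := ih f f' nxt depth pre hnxtlen (hsort.sublist hnxtsub) hpre
        (fun r hr => hall r (hnxtsub.mem hr))
        (fun c' run' hsub' hsort' hpre' hne' => HG c' run' (hsub'.trans hnxtsub) hsort' hpre' hne')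
      rw [hrec]
      -- the head call, via HG
      have hrunsub : run.Sublist (r0 :: rest') := by
        rw [hrun]; exact List.takeWhile_sublist p
      have hruncall := HG c run hrunsub
        (hsort.sublist hrunsub)
        (fun r hr => by
          obtain ⟨h1, h2, h3⟩ := hrunmem r hr
          refine ⟨pv_prefix_snoc hpre h2 h3 c h1, h3⟩)
        hrunne
      rw [hruncall]
      -- now the set/sum bookkeeping
      have hne_all : ∀ x ∈ r0 :: rest', List.drop depth x ≠ [] := by
        intro x hx
        obtain ⟨_, hdx⟩ := hall x hx
        simp [List.drop_eq_nil_iff]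
        omega
      have hGne : Gne ((r0 :: rest').map (List.drop depth)) = (r0 :: rest').map (List.drop depth) := by
        apply Gne_self
        intro r hr
        obtain ⟨x, hx, rfl⟩ := List.mem_map.1 hr
        exact hne_all x hx
      have hGneN : Gne (nxt.map (List.drop depth)) = nxt.map (List.drop depth) := by
        apply Gne_self
        intro r hr
        obtain ⟨x, hx, rfl⟩ := List.mem_map.1 hr
        exact hne_all x (hnxtsub.mem hx)
      have hsplit2 : r0 :: rest' = run ++ nxt := hsplit
      have hsplitD : (r0 :: rest').map (List.drop depth)
          = run.map (List.drop depth) ++ nxt.map (List.drop depth) := by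
        conv_lhs => rw [hsplit2]
        rw [List.map_append]
      -- heads
      have hheads : ((r0 :: rest').map (List.drop depth)).map (fun r => r.headI)
          = (run.map (List.drop depth)).map (fun r => r.headI)
            ++ (nxt.map (List.drop depth)).map (fun r => r.headI) := by
        rw [hsplitD, List.map_append]
      have hrunheads : ∀ y ∈ (run.map (List.drop depth)).map (fun r => r.headI), y = c := by
        intro y hy
        obtain ⟨r, hr, rfl⟩ := List.mem_map.1 hy
        obtain ⟨x, hx, rfl⟩ := List.mem_map.1 hr
        exact (hrunmem x hx).1
      have hcnotin : c ∉ ((nxt.map (List.drop depth)).map (fun r => r.headI)).toFinset := by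
        simp only [List.mem_toFinset]
        intro hcmem
        obtain ⟨r, hr, hrc⟩ := List.mem_map.1 hcmem
        obtain ⟨x, hx, rfl⟩ := List.mem_map.1 hr
        exact hnxtmem x hx hrc
      have hSet : (((r0 :: rest').map (List.drop depth)).map (fun r => r.headI)).toFinset
          = insert c ((nxt.map (List.drop depth)).map (fun r => r.headI)).toFinset := by
        rw [hheads]
        apply Finset.ext
        intro y
        simp only [List.toFinset_append, Finset.mem_union, List.mem_toFinset, Finset.mem_insert]
        constructor
        · rintro (hy | hy)
          · exact Or.inl (hrunheads y hy)
          · exact Or.inr (by simpa using hy)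
        · rintro (rfl | hy)
          · left
            have : r0 ∈ run := by
              rw [hrun, List.takeWhile_cons_of_pos hpr0]
              simp
            exact List.mem_map.2 ⟨r0.drop depth, List.mem_map.2 ⟨r0, this, rfl⟩, hc.symm⟩
          · exact Or.inr (by simpa using hy)
      rw [hSet, Finset.sum_insert hcnotin]
      congr 1
      · -- head group = the run, one level deeper
        have hgrp : Ggroup ((r0 :: rest').map (List.drop depth)) c
            = run.map (List.drop (depth+1)) := by
          unfold Ggroup
          rw [hGne, hsplitD, List.filter_append]
          have h1 : (run.map (List.drop depth)).filter (fun r => r.headI == c)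
              = run.map (List.drop depth) := by
            rw [List.filter_eq_self]
            intro r hr
            obtain ⟨x, hx, rfl⟩ := List.mem_map.1 hr
            simp [(hrunmem x hx).1]
          have h2 : (nxt.map (List.drop depth)).filter (fun r => r.headI == c) = [] := by
            rw [List.filter_eq_nil_iff]
            intro r hr
            obtain ⟨x, hx, rfl⟩ := List.mem_map.1 hr
            simp [hnxtmem x hx]
          rw [h1, h2, List.append_nil, List.map_map]
          apply List.map_congr_left
          intro x _
          simp [List.tail_drop]
        rw [hgrp]
      · -- the remaining groups ignore the run
        apply Finset.sum_congr rfl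
        intro c' hc'
        have hc'ne : c' ≠ c := by
          intro he; subst he; exact hcnotin hc'
        apply congrArg
        unfold Ggroup
        rw [hGne, hGneN, hsplitD, List.filter_append]
        have h1 : (run.map (List.drop depth)).filter (fun r => r.headI == c') = [] := by
          rw [List.filter_eq_nil_iff]
          intro r hr
          obtain ⟨x, hx, rfl⟩ := List.mem_map.1 hr
          simp [(hrunmem x hx).1, hc'ne.symm]
        rw [h1, List.nil_append]

theorem B_eq : ∀ (n : Nat) (f f' : Nat) (group : List (List Char)) (depth : Nat) (pre : List Char),
    pvMu (group.map (List.drop depth)) ≤ n →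
    pvMu (group.map (List.drop depth)) ≤ f →
    pvMu (group.map (List.drop depth)) ≤ f' →
    group.Pairwise (· ≤ ·) → pre.length = depth → (∀ r ∈ group, pre <+: r) →
    0 < depth →
    goF f group depth = G f' (group.map (List.drop depth)) := by
  intro n
  induction n using Nat.strong_induction_on with
  | _ n IH =>
    intro f f' group depth pre hn hf hf' hsort hpre hall hdep
    cases group with
    | nil =>
      cases f with
      | zero => simp [goF, G_nil]
      | succ f0 => simp [goF, goLoopAux, G_nil]
    | cons x xs =>
      have hmu1 : 1 ≤ pvMu ((x :: xs).map (List.drop depth)) := by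
        rw [pvMu_eq]; simp; omega
      match f, hf with
      | 0, hf => omega
      | f0+1, hf =>
      match f', hf' with
      | 0, hf' => omega
      | f1+1, hf' =>
      -- the skip loop removes exactly the words that end here
      have hpair : (x :: xs).Pairwise (fun a b => (b.length == depth) = true → (a.length == depth) = true) := by
        refine List.Pairwise.imp_of_mem ?_ hsort
        intro a b ha hb hab hpb
        have hbpre := hall b hb
        have hapre := hall a ha
        have hblen : b.length = depth := by simpa using hpb
        have hbl : b = pre := (hbpre.eq_of_length (by rw [hpre, hblen])).symm
        have ha2 : a = pre := le_antisymm (hbl ▸ hab) (pv_prefix_le hapre)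
        simp [ha2, hpre]
      obtain ⟨htw, hdw⟩ := pv_tw_filter (fun r : List Char => r.length == depth) (x :: xs) hpair
      set rest := (x :: xs).dropWhile (fun r => r.length == depth) with hrest
      clear_value rest
      have hrestsub : rest.Sublist (x :: xs) := by
        rw [hrest]; exact List.dropWhile_sublist _
      have hrestmem : ∀ r ∈ rest, pre <+: r ∧ depth < r.length := by
        intro r hr
        have hr' : r ∈ x :: xs := hrestsub.mem hr
        have h1 := hall r hr'
        refine ⟨h1, ?_⟩
        have h2 : ¬ (r.length == depth) = true := by
          rw [hdw] at hr
          have := (List.mem_filter.1 hr).2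
          simpa using this
        have := h1.length_le
        simp at h2
        omega
      have hmusub : pvMu (rest.map (List.drop depth)) ≤ pvMu ((x :: xs).map (List.drop depth)) :=
        pvMu_sublist (hrestsub.map _)
      have HG : ∀ (c : Char) (run : List (List Char)), run.Sublist rest → run.Pairwise (· ≤ ·) →
          (∀ r ∈ run, (pre ++ [c]) <+: r ∧ depth < r.length) → run ≠ [] →
          goF f0 run (depth+1) = G f1 (run.map (List.drop (depth+1))) := by
        intro c run hsub' hsort' hpre' hne'
        have hrunlen : ∀ r ∈ run, depth < r.length := fun r hr => (hpre' r hr).2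
        have hds := pv_mu_drop_succ hrunlen
        have hrl : 1 ≤ run.length := by
          cases run with
          | nil => exact absurd rfl hne'
          | cons a t => simp
        have hmurun : pvMu (run.map (List.drop depth)) ≤ pvMu (rest.map (List.drop depth)) :=
          pvMu_sublist (hsub'.map _)
        exact IH (n-1) (by omega) f0 f1 run (depth+1) (pre ++ [c])
          (by omega) (by omega) (by omega) hsort' (by simp [hpre]) (fun r hr => (hpre' r hr).1)
          (by omega)
      have hloop := loop_eq rest.length f0 f1 rest depth pre (le_refl _)
        (hsort.sublist hrestsub) hpre hrestmem HG
      -- evaluate goF once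
      rw [show goF (f0+1) (x :: xs) depth
            = (if 0 < depth ∧ 2 ≤ ((x :: xs).length : Int)
                  - 2 * goLoopAux (goF f0) rest.length rest depth
               then goLoopAux (goF f0) rest.length rest depth + 1
               else goLoopAux (goF f0) rest.length rest depth) from by
          simp only [goF, hrest]]
      rw [hloop]
      -- and G once
      have hGneEq : Gne ((x :: xs).map (List.drop depth)) = rest.map (List.drop depth) := by
        unfold Gne
        rw [List.filter_map, hdw]
        congr 1
        apply List.filter_congr
        intro r hr
        have h1 : depth ≤ r.length := by rw [← hpre]; exact (hall r hr).length_le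
        simp only [Function.comp_def]
        by_cases h2 : r.length = depth
        · simp [h2]
        · have h3 : depth < r.length := by omega
          simp [h3, h2]
      have hGgroups : ∀ c, Ggroup ((x :: xs).map (List.drop depth)) c
          = Ggroup (rest.map (List.drop depth)) c := by
        intro c
        apply Ggroup_congr
        rw [hGneEq, ← hGneEq, Gne_idem, hGneEq]
      rw [G_succ]
      rw [hGneEq]
      have hsube : ∑ c ∈ ((rest.map (List.drop depth)).map (fun r => r.headI)).toFinset,
            G f1 (Ggroup ((x :: xs).map (List.drop depth)) c)
          = ∑ c ∈ ((rest.map (List.drop depth)).map (fun r => r.headI)).toFinset,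
            G f1 (Ggroup (rest.map (List.drop depth)) c) :=
        Finset.sum_congr rfl (fun c _ => congrArg _ (hGgroups c))
      rw [hsube]
      have hlen : ((x :: xs).map (List.drop depth)).length = (x :: xs).length := by simp
      rw [hlen]
      have hiff : (0 < depth ∧ 2 ≤ ((x :: xs).length : Int)
            - 2 * ∑ c ∈ ((rest.map (List.drop depth)).map (fun r => r.headI)).toFinset,
                G f1 (Ggroup (rest.map (List.drop depth)) c))
          ↔ (1 < ((x :: xs).length : Int)
            - 2 * ∑ c ∈ ((rest.map (List.drop depth)).map (fun r => r.headI)).toFinset,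
                G f1 (Ggroup (rest.map (List.drop depth)) c)) := by
        constructor
        · rintro ⟨_, h⟩; omega
        · intro h; exact ⟨hdep, by omega⟩
      rw [if_congr hiff rfl rfl]

theorem pv_sorted_le (xs : List (List Char)) :
    (PySem.List.sorted xs (fun x => x) false).Pairwise (fun a b => a ≤ b) := by
  have hdec : (LinearOrder.toDecidableLT (α := List Char)) = (fun (a b : List Char) => a.decidableLT b) := by
    funext a b
    exact Subsingleton.elim _ _
  have h := PySem.List.sorted_pairwise (κ := List Char) xs (fun x => x)
  rw [hdec] at h
  exact h

theorem pv_map_drop_zero (l : List (List Char)) : l.map (List.drop 0) = l := by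
  induction l with
  | nil => rfl
  | cons a t ih => simp [ih]

theorem solve_alt_eq (words : List String) (h : ∀ w ∈ words, w.toList ≠ []) (F : Nat)
    (hF : pvMu (words.map pvRev) ≤ F) :
    solve_alt words = ∑ c ∈ (((PySem.List.sorted (words.map pvRev) (fun x => x) false)).map (fun r => r.headI)).toFinset,
      G F (Ggroup (PySem.List.sorted (words.map pvRev) (fun x => x) false) c) := by
  have hLrw : words.map (fun w => w.toList.reverse) = words.map pvRev := rfl
  cases hw : words with
  | nil =>
    subst hw
    rw [show solve_alt [] = 0 from rfl]
    rw [show PySem.List.sorted (([] : List String).map pvRev) (fun x => x) false = [] from rfl]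
    simp
  | cons w0 ws' =>
    subst hw
    have hperm : (PySem.List.sorted ((w0 :: ws').map pvRev) (fun x => x) false).Perm
        ((w0 :: ws').map pvRev) := PySem.List.sorted_perm _ _ _
    have hmuR : pvMu (PySem.List.sorted ((w0 :: ws').map pvRev) (fun x => x) false)
        = pvMu ((w0 :: ws').map pvRev) := pvMu_perm hperm
    have hRne : ∀ r ∈ PySem.List.sorted ((w0 :: ws').map pvRev) (fun x => x) false, r ≠ [] := by
      intro r hr
      have : r ∈ (w0 :: ws').map pvRev := hperm.mem_iff.1 hr
      obtain ⟨w, hw2, rfl⟩ := List.mem_map.1 this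
      simpa [pvRev] using h w hw2
    have hRlen : (PySem.List.sorted ((w0 :: ws').map pvRev) (fun x => x) false).length
        = (w0 :: ws').length := by
      rw [hperm.length_eq, List.length_map]
    have hmu1 : 1 ≤ pvMu (PySem.List.sorted ((w0 :: ws').map pvRev) (fun x => x) false) := by
      rw [pvMu_eq]
      have : 1 ≤ (PySem.List.sorted ((w0 :: ws').map pvRev) (fun x => x) false).length := by
        rw [hRlen]; simp
      omega
    unfold solve_alt
    rw [hLrw]
    set R := PySem.List.sorted ((w0 :: ws').map pvRev) (fun x => x) false with hR
    clear_value R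
    show goF (pvMu R) R 0 = ∑ c ∈ (R.map (fun r => r.headI)).toFinset, G F (Ggroup R c)
    rw [show pvMu R = (pvMu R - 1) + 1 from by omega]
    set f0 := pvMu R - 1 with hf0
    have hdropid : R.dropWhile (fun r => r.length == 0) = R := by
      cases hRc : R with
      | nil => rfl
      | cons a t =>
        have ha := hRne a (by rw [hRc]; simp)
        rw [List.dropWhile_cons_of_neg]
        cases a with
        | nil => exact absurd rfl ha
        | cons ch tl => simp
    rw [show goF (f0+1) R 0
          = (if 0 < 0 ∧ 2 ≤ ((R.length : Int))
                - 2 * goLoopAux (goF f0) (R.dropWhile (fun r => r.length == 0)).length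
                      (R.dropWhile (fun r => r.length == 0)) 0
             then goLoopAux (goF f0) (R.dropWhile (fun r => r.length == 0)).length
                      (R.dropWhile (fun r => r.length == 0)) 0 + 1
             else goLoopAux (goF f0) (R.dropWhile (fun r => r.length == 0)).length
                      (R.dropWhile (fun r => r.length == 0)) 0) from by
        simp only [goF]]
    rw [hdropid]
    rw [if_neg (by simp)]
    have hmem : ∀ r ∈ R, ([] : List Char) <+: r ∧ 0 < r.length := by
      intro r hr
      refine ⟨List.nil_prefix, ?_⟩
      have := hRne r hr
      cases r with
      | nil => exact absurd rfl this
      | cons a t => simp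
    have HG : ∀ (c : Char) (run : List (List Char)), run.Sublist R → run.Pairwise (· ≤ ·) →
        (∀ r ∈ run, ([] ++ [c]) <+: r ∧ 0 < r.length) → run ≠ [] →
        goF f0 run (0+1) = G F (run.map (List.drop (0+1))) := by
      intro c run hsub hsort' hpre' hne'
      have hrunlen : ∀ r ∈ run, 0 < r.length := fun r hr => (hpre' r hr).2
      have hds0 := pv_mu_drop_succ (depth := 0) hrunlen
      rw [pv_map_drop_zero run] at hds0
      have hds : pvMu (run.map (List.drop 1)) + run.length = pvMu run := by simpa using hds0
      have hrl : 1 ≤ run.length := by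
        cases run with
        | nil => exact absurd rfl hne'
        | cons a t => simp
      have hmurun : pvMu run ≤ pvMu R := pvMu_sublist hsub
      have hfF : pvMu R ≤ F := by omega
      exact B_eq (pvMu (run.map (List.drop 1))) f0 F run 1 [c]
        (le_refl _) (by omega) (by omega) hsort' (by simp)
        (fun r hr => (hpre' r hr).1) (by omega)
    have hsortR : R.Pairwise (· ≤ ·) := by rw [hR]; exact pv_sorted_le _
    have hloop := loop_eq R.length f0 F R 0 [] (le_refl _) hsortR rfl hmem HG
    rw [hloop]
    rw [pv_map_drop_zero R]

-- ===== VERDICT =====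
theorem solve_spec : Claim_equal_solve := by
  intro words _ hpre
  unfold Spec_solve
  have h : ∀ w ∈ words, w.toList ≠ [] := by
    intro w hw
    simp only [ne_eq, String.toList_eq_nil_iff]
    exact hpre w hw
  have hperm : (PySem.List.sorted (words.map pvRev) (fun x => x) false).Perm
      (words.map pvRev) := PySem.List.sorted_perm _ _ _
  rw [solve_eq words h (pvMu (words.map pvRev)) (le_refl _),
      solve_alt_eq words h (pvMu (words.map pvRev)) (le_refl _)]
  have hsets : ((words.map pvRev).map (fun r => r.headI)).toFinset
      = ((PySem.List.sorted (words.map pvRev) (fun x => x) false).map (fun r => r.headI)).toFinset := by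
    apply Finset.ext
    intro c
    simp only [List.mem_toFinset]
    exact (hperm.map _).mem_iff.symm
  rw [hsets]
  apply Finset.sum_congr rfl
  intro c _
  exact G_perm _ (((Gne_perm hperm.symm).filter _).map _)
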